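-- pv_equiv track=rewrite | github.com/redlion47/slc-bc17 | missing_number.py | find_missing
-- ===== SOURCE A (Python) =====
-- def find_missing(list1, list2):
-- 	if type(list1) == list and type(list2) == list:
--
-- 		if len(list1) == 0 and len(list2) == 0:
-- 			return 0
--
-- 		else:
-- 			for x in list1:
-- 				list2.remove(x)
--
-- 			if len(list2) == 0:
-- 				return 0
-- 			else:
-- 				termin = list2[0]
--
-- 				return termin
-- ===== SOURCE B (Python) =====
-- def find_missing(list1, list2):
--     # Index every value of list2 by its positions; each element of list1
--     # consumes the next position of its value; return the first position
--     # left standing.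
--     positions = {}
--     for i, y in enumerate(list2):
--         positions.setdefault(y, []).append(i)
--     removed = set()
--     taken = {}
--     for x in list1:
--         k = taken.get(x, 0)
--         removed.add(positions[x][k])
--         taken[x] = k + 1
--     for i, y in enumerate(list2):
--         if i not in removed:
--             return y
--     return 0
-- ===== Notes on version B (the rewrite author's own statement) =====
-- stated objective: faster
-- what changed: Replaces the repeated list2.remove scans with a positions index of list2 (value -> list of indices) built in one pass, one pop per list1 element collected into a removed-index set, and a single scan returning the first surviving element; B does not mutate list2. Pre_ excludes inputs where some value occurs more often in list1 than in list2: there A raises ValueError from list2.remove (and B raises KeyError/IndexError from its index lookup).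
import Mathlib
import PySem

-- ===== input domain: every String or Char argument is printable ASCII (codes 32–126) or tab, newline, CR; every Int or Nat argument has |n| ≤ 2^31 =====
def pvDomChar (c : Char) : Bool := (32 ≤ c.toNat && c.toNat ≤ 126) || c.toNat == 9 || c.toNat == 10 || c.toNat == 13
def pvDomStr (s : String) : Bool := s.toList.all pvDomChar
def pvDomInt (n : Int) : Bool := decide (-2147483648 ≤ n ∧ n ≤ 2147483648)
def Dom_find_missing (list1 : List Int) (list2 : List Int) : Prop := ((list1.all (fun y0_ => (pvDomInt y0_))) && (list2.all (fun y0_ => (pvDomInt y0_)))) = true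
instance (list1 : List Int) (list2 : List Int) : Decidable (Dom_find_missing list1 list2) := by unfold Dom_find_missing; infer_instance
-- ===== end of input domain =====

-- B replaces A's repeated list2.remove scans by a positions index of list2, one pop per
-- list1 element and a single scan for the first surviving element (faster); equivalence
-- is about the RETURN value only: A mutates list2, B does not.

-- ===== PORT A =====
-- for x in list1: list2.remove(x)  — sequential first-occurrence removal; none = ValueError
def find_missing (list1 : List Int) (list2 : List Int) : Int :=
  if list1.length = 0 ∧ list2.length = 0 then 0
  else
    match list1.foldl (fun acc x => acc.bind (fun l => PySem.List.remove? l x)) (some list2) with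
    | none => 0  -- Python raises ValueError here; excluded by Pre_find_missing
    | some l2' => if l2'.length = 0 then 0 else PySem.List.pyGetD l2' 0 0

-- ===== PORT B =====
-- final loop of Source B: first element of list2 whose index was not removed
def pvFind (removed : PySem.Set Int) : List (Int × Int) → Int
  | [] => 0
  | p :: rest => if PySem.Set.contains removed p.1 then pvFind removed rest else p.2

def find_missing_alt (list1 : List Int) (list2 : List Int) : Int :=
  -- positions.setdefault(y, []).append(i)  =  positions[y] = positions.get(y, []) + [i]
  let positions := (PySem.List.enumerate list2).foldl
      (fun d p => d.modify p.2 [] (· ++ [p.1])) PySem.Dict.empty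
  -- state = (taken, removed); removed.add(positions[x][k]) with k = taken.get(x, 0);
  -- none = KeyError (positions[x]) / IndexError (ps[k])
  match list1.foldl
      (fun (acc : Option (PySem.Dict Int Int × PySem.Set Int)) x =>
        acc.bind (fun s =>
          match positions.get? x with
          | none => none
          | some ps =>
            match PySem.List.pyGet? ps (s.1.getD x 0) with
            | none => none
            | some j => some (s.1.insert x (s.1.getD x 0 + 1), PySem.Set.add s.2 j)))
      (some (PySem.Dict.empty, PySem.Set.empty)) with
  | none => 0  -- Python raises here; excluded by Pre_find_missing
  | some s => pvFind s.2 (PySem.List.enumerate list2)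

-- ===== PRECONDITION & SPEC =====
-- Pre_ excludes exactly the inputs where some value occurs more often in list1 than in
-- list2: there A's list2.remove raises ValueError (and B's index pop raises too).
def Pre_find_missing (list1 : List Int) (list2 : List Int) : Prop :=
  ∀ v ∈ list1, list1.count v ≤ list2.count v
instance (list1 : List Int) (list2 : List Int) : Decidable (Pre_find_missing list1 list2) := by unfold Pre_find_missing; infer_instance

def pvWitness_find_missing : List Int × List Int := ([1, 2], [2, 3, 1])

def Spec_find_missing (list1 : List Int) (list2 : List Int) (out : Int) : Prop := out = find_missing_alt list1 list2
instance (list1 : List Int) (list2 : List Int) (out : Int) : Decidable (Spec_find_missing list1 list2 out) := by unfold Spec_find_missing; infer_instance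

-- ===== CLAIM (what is proved, stated in full; the proofs are below) =====
def Claim_equal_find_missing : Prop := ∀ (list1 : List Int) (list2 : List Int), Dom_find_missing list1 list2 → Pre_find_missing list1 list2 → Spec_find_missing list1 list2 (find_missing list1 list2)

-- ===== LEMMAS AND PROOFS =====

-- common middle ground: scan list2 decrementing a counter of list1, return the survivor
def pvScan : PySem.Dict Int Int → List Int → Int
  | _, [] => 0
  | d, y :: rest =>
      let n := d.getD y 0
      if n > 0 then pvScan (d.insert y (n - 1)) rest else y

-- ---------- A-side: the removal loop ----------

def pvRem (l1 : List Int) (acc : Option (List Int)) : Option (List Int) :=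
  l1.foldl (fun a x => a.bind (fun l => PySem.List.remove? l x)) acc

theorem pvRem_none (l1 : List Int) : pvRem l1 none = none := by
  induction l1 with
  | nil => rfl
  | cons x t ih => simpa [pvRem, List.foldl] using ih

-- two removals commute
theorem remove?_comm (l : List Int) (x y : Int) :
    (PySem.List.remove? l x).bind (fun l' => PySem.List.remove? l' y)
      = (PySem.List.remove? l y).bind (fun l' => PySem.List.remove? l' x) := by
  by_cases hxy : x = y
  · subst hxy; rfl
  · induction l with
    | nil => rfl
    | cons a t ih =>
      by_cases hax : a = x
      · subst hax
        rw [PySem.List.remove?_cons_self, PySem.List.remove?_cons_of_ne t hxy]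
        cases h : PySem.List.remove? t y with
        | none => simp [h]
        | some t' => simp [h, PySem.List.remove?_cons_self]
      · by_cases hay : a = y
        · subst hay
          rw [PySem.List.remove?_cons_self, PySem.List.remove?_cons_of_ne t (fun h => hxy h.symm)]
          cases h : PySem.List.remove? t x with
          | none => simp [h]
          | some t' => simp [h, PySem.List.remove?_cons_self]
        · rw [PySem.List.remove?_cons_of_ne t hax, PySem.List.remove?_cons_of_ne t hay]
          cases hx : PySem.List.remove? t x with
          | none =>
            cases hy : PySem.List.remove? t y with
            | none => simp
            | some ty =>
              have h2 := ih; rw [hx, hy] at h2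
              rw [Option.bind_none, Option.bind_some] at h2
              simp [PySem.List.remove?_cons_of_ne ty hax, ← h2]
          | some tx =>
            cases hy : PySem.List.remove? t y with
            | none =>
              have h2 := ih; rw [hx, hy] at h2
              rw [Option.bind_some, Option.bind_none] at h2
              simp [PySem.List.remove?_cons_of_ne tx hay, h2]
            | some ty =>
              have h2 := ih; rw [hx, hy] at h2
              rw [Option.bind_some, Option.bind_some] at h2
              simp [PySem.List.remove?_cons_of_ne tx hay, PySem.List.remove?_cons_of_ne ty hax, h2]

theorem pvRem_perm {l1 l1' : List Int} (h : l1.Perm l1') (acc : Option (List Int)) :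
    pvRem l1 acc = pvRem l1' acc := by
  unfold pvRem
  exact @List.Perm.foldl_eq _ _
    (fun (a : Option (List Int)) x => a.bind (fun l => PySem.List.remove? l x)) _ _
    ⟨fun a x y => by
      cases a with
      | none => rfl
      | some l => simpa using remove?_comm l x y⟩ h acc

-- removing values absent from the head keeps the head
theorem pvRem_not_mem {y : Int} (l1 : List Int) (hy : y ∉ l1) (s : List Int) :
    pvRem l1 (some (y :: s)) = (pvRem l1 (some s)).map (y :: ·) := by
  induction l1 generalizing s with
  | nil => rfl
  | cons x t ih =>
    have hxy : y ≠ x := fun h => hy (h ▸ List.mem_cons_self)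
    have hyt : y ∉ t := fun h => hy (List.mem_cons_of_mem _ h)
    show pvRem t ((some (y :: s)).bind (fun l => PySem.List.remove? l x))
        = (pvRem t ((some s).bind (fun l => PySem.List.remove? l x))).map (y :: ·)
    rw [Option.bind_some, Option.bind_some, PySem.List.remove?_cons_of_ne s hxy]
    cases h : PySem.List.remove? s x with
    | none => simp [pvRem_none]
    | some s' => simpa using ih hyt s'

-- under the count precondition the removal loop never fails
theorem pvRem_succeeds (l1 : List Int) (l2 : List Int)
    (h : ∀ v, l1.count v ≤ l2.count v) : ∃ l', pvRem l1 (some l2) = some l' := by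
  induction l1 generalizing l2 with
  | nil => exact ⟨l2, rfl⟩
  | cons x t ih =>
    have hx : x ∈ l2 := by
      have h1 := h x
      rw [List.count_cons_self] at h1
      exact List.one_le_count_iff.mp (by omega)
    have hrem : PySem.List.remove? l2 x = some (l2.erase x) :=
      PySem.List.remove?_eq_some_erase l2 x hx
    have hc : ∀ v, t.count v ≤ (l2.erase x).count v := by
      intro v
      have h1 := h v
      rw [List.count_erase]
      by_cases hv : v = x
      · subst hv
        rw [List.count_cons_self] at h1
        simp only [BEq.rfl, if_true]; omega
      · rw [List.count_cons_of_ne (Ne.symm hv)] at h1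
        simp only [beq_iff_eq, Ne.symm hv, if_false]; omega
    obtain ⟨l', hl'⟩ := ih (l2.erase x) hc
    refine ⟨l', ?_⟩
    show pvRem t ((some l2).bind (fun l => PySem.List.remove? l x)) = some l'
    rw [Option.bind_some, hrem]
    exact hl'

-- A's result is the decrement scan
theorem pv_main (l2 : List Int) : ∀ (l1 : List Int) (d : PySem.Dict Int Int),
    (∀ v, d.getD v 0 = l1.count v) →
    (∀ v, l1.count v ≤ l2.count v) →
    (match pvRem l1 (some l2) with
      | none => (0 : Int)
      | some l2' => if l2'.length = 0 then 0 else PySem.List.pyGetD l2' 0 0)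
      = pvScan d l2 := by
  induction l2 with
  | nil =>
    intro l1 d hd hc
    have hnil : l1 = [] := by
      apply List.eq_nil_iff_forall_not_mem.mpr
      intro x hx
      have h1 : 1 ≤ l1.count x := List.one_le_count_iff.mpr hx
      have h2 := hc x
      simp only [List.count_nil] at h2; omega
    subst hnil
    simp [pvRem, pvScan]
  | cons y rest ih =>
    intro l1 d hd hc
    by_cases hy : y ∈ l1
    · -- y is consumed by a removal; the scan decrements its count
      have hcount : 0 < l1.count y := List.count_pos_iff.mpr hy
      have hpos : (0 : Int) < d.getD y 0 := by rw [hd y]; exact_mod_cast hcount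
      have hscan : pvScan d (y :: rest) = pvScan (d.insert y (d.getD y 0 - 1)) rest := by
        simp only [pvScan]
        rw [if_pos hpos]
      rw [hscan]
      rw [pvRem_perm (List.perm_cons_erase hy) (some (y :: rest))]
      have hstep : pvRem (y :: l1.erase y) (some (y :: rest)) = pvRem (l1.erase y) (some rest) := by
        show pvRem (l1.erase y) ((some (y :: rest)).bind (fun l => PySem.List.remove? l y))
            = pvRem (l1.erase y) (some rest)
        rw [Option.bind_some, PySem.List.remove?_cons_self]
      rw [hstep]
      apply ih
      · intro v
        by_cases hv : v = y
        · subst hv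
          rw [PySem.Dict.getD_insert_self, hd v, List.count_erase_self]
          omega
        · rw [PySem.Dict.getD_insert_of_ne d _ _ hv, hd v, List.count_erase_of_ne hv]
      · intro v
        have h1 := hc v
        rw [List.count_erase]
        by_cases hv : v = y
        · subst hv
          rw [List.count_cons_self] at h1
          simp only [BEq.rfl, if_true]; omega
        · rw [List.count_cons_of_ne (Ne.symm hv)] at h1
          simp only [beq_iff_eq, Ne.symm hv, if_false]; omega
    · -- y survives as the first element; the scan returns it
      have hcount : l1.count y = 0 := List.count_eq_zero.mpr hy
      have h0 : d.getD y 0 = 0 := by rw [hd y, hcount]; rfl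
      have hscan : pvScan d (y :: rest) = y := by
        simp only [pvScan]
        rw [if_neg (by rw [h0]; omega)]
      rw [hscan]
      have hcrest : ∀ v, l1.count v ≤ rest.count v := by
        intro v
        have h1 := hc v
        by_cases hv : v = y
        · subst hv; omega
        · rw [List.count_cons_of_ne (Ne.symm hv)] at h1; exact h1
      obtain ⟨l', hl'⟩ := pvRem_succeeds l1 rest hcrest
      rw [pvRem_not_mem l1 hy rest, hl']
      simp [PySem.List.pyGetD_zero_cons]

-- ---------- B-side: occurrence positions ----------

-- the 0-based indices at which v occurs in a list
def pvOccPos : List Int → Int → List Nat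
  | [], _ => []
  | y :: t, v => if y = v then 0 :: (pvOccPos t v).map (· + 1) else (pvOccPos t v).map (· + 1)

theorem pvOccPos_cons_self (v : Int) (t : List Int) :
    pvOccPos (v :: t) v = 0 :: (pvOccPos t v).map (· + 1) := by
  simp [pvOccPos]

theorem pvOccPos_cons_ne {y v : Int} (t : List Int) (h : y ≠ v) :
    pvOccPos (y :: t) v = (pvOccPos t v).map (· + 1) := by
  simp [pvOccPos, h]

theorem pvOccPos_length (l : List Int) (v : Int) : (pvOccPos l v).length = l.count v := by
  induction l with
  | nil => rfl
  | cons y t ih =>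
    by_cases h : y = v
    · subst h; simp [pvOccPos, List.count_cons_self, ih]
    · simp [pvOccPos, h, ih]

-- the m-th occurrence position: its value and its prefix count
theorem pvOccPos_drop (l : List Int) (v : Int) :
    ∀ (m j : Nat) (tl : List Nat), (pvOccPos l v).drop m = j :: tl →
    j < l.length ∧ l.getD j 0 = v ∧ (l.take j).count v = m := by
  induction l with
  | nil => intro m j tl h; simp [pvOccPos] at h
  | cons y t ih =>
    intro m j tl h
    by_cases hy : y = v
    · subst hy
      rw [pvOccPos_cons_self] at h
      cases m with
      | zero =>
        simp only [List.drop_zero] at h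
        obtain ⟨h1, _⟩ := List.cons.inj h
        subst h1
        refine ⟨by simp, by simp, by simp⟩
      | succ m' =>
        rw [List.drop_succ_cons, ← List.map_drop] at h
        cases hP : (pvOccPos t y).drop m' with
        | nil => rw [hP] at h; simp at h
        | cons j' tl' =>
          rw [hP] at h
          simp only [List.map_cons] at h
          obtain ⟨h1, _⟩ := List.cons.inj h
          obtain ⟨hj1, hj2, hj3⟩ := ih m' j' tl' hP
          subst h1
          refine ⟨by simpa using hj1, by simpa using hj2, ?_⟩
          rw [List.take_succ_cons, List.count_cons_self, hj3]
    · rw [pvOccPos_cons_ne t hy, ← List.map_drop] at h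
      cases hP : (pvOccPos t v).drop m with
      | nil => rw [hP] at h; simp at h
      | cons j' tl' =>
        rw [hP] at h
        simp only [List.map_cons] at h
        obtain ⟨h1, _⟩ := List.cons.inj h
        obtain ⟨hj1, hj2, hj3⟩ := ih m j' tl' hP
        subst h1
        refine ⟨by simpa using hj1, by simpa using hj2, ?_⟩
        rw [List.take_succ_cons, List.count_cons_of_ne hy, hj3]

-- conversely, an index with value v and prefix count m is the m-th occurrence position
theorem pvOccPos_of_count (l : List Int) (v : Int) :
    ∀ (j : Nat), j < l.length → l.getD j 0 = v →
    ∃ tl, (pvOccPos l v).drop ((l.take j).count v) = j :: tl := by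
  induction l with
  | nil => intro j h; simp at h
  | cons y t ih =>
    intro j hj hv
    cases j with
    | zero =>
      simp only [List.getD_cons_zero] at hv
      subst hv
      exact ⟨(pvOccPos t y).map (· + 1), by rw [pvOccPos_cons_self]; simp⟩
    | succ j' =>
      simp only [List.getD_cons_succ] at hv
      have hj' : j' < t.length := by simpa using hj
      obtain ⟨tl, htl⟩ := ih j' hj' hv
      by_cases hy : y = v
      · subst hy
        refine ⟨tl.map (· + 1), ?_⟩
        rw [List.take_succ_cons, List.count_cons_self, pvOccPos_cons_self,
          List.drop_succ_cons, ← List.map_drop, htl]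
        rfl
      · refine ⟨tl.map (· + 1), ?_⟩
        rw [List.take_succ_cons, List.count_cons_of_ne hy, pvOccPos_cons_ne t hy,
          ← List.map_drop, htl]
        rfl

-- the positions dict built by B's first loop, per key
theorem pv_enum_filter (l : List Int) (v : Int) : ∀ s : Int,
    ((((PySem.List.enumerate l s).map Prod.swap).filter (fun q => q.1 == v)).map (fun q => q.2))
      = (pvOccPos l v).map (fun k : Nat => s + (k : Int)) := by
  induction l with
  | nil => intro s; simp [PySem.List.enumerate_nil, pvOccPos]
  | cons y t ih =>
    intro s
    rw [PySem.List.enumerate_cons]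
    by_cases hy : y = v
    · subst hy
      rw [pvOccPos_cons_self, List.map_cons, List.filter_cons]
      simp only [Prod.swap_prod_mk]
      rw [if_pos (by simp), List.map_cons, ih (s + 1), List.map_cons, List.map_map]
      refine congrArg₂ _ (by simp) ?_
      apply List.map_congr_left
      intro k _
      simp only [Function.comp_apply]
      push_cast; ring
    · rw [pvOccPos_cons_ne t hy, List.map_cons, List.filter_cons]
      simp only [Prod.swap_prod_mk]
      rw [if_neg (by simpa using hy), ih (s + 1), List.map_map]
      apply List.map_congr_left
      intro k _
      simp only [Function.comp_apply]
      push_cast; ring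

-- full characterisation of the built positions dict
theorem pv_build (l2 : List Int) (v : Int) :
    ((PySem.List.enumerate l2).foldl
        (fun d p => d.modify p.2 [] (· ++ [p.1])) PySem.Dict.empty).get? v
      = if v ∈ l2 then some ((pvOccPos l2 v).map (fun k : Nat => (k : Int))) else none := by
  have hfold : (PySem.List.enumerate l2).foldl
      (fun d p => d.modify p.2 [] (· ++ [p.1])) (PySem.Dict.empty : PySem.Dict Int (List Int))
      = ((PySem.List.enumerate l2).map Prod.swap).foldl
        (fun d q => d.modify q.1 [] (· ++ [q.2])) PySem.Dict.empty := by
    rw [List.foldl_map]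
    rfl
  have hkeys : ∀ w : Int, (((PySem.List.enumerate l2).map Prod.swap).foldl
      (fun d q => d.modify q.1 [] (· ++ [q.2])) (PySem.Dict.empty : PySem.Dict Int (List Int))).contains w
      = (w ∈ l2 : Bool) := by
    intro w
    rw [show ((((PySem.List.enumerate l2).map Prod.swap).foldl (fun d q => d.modify q.1 [] (· ++ [q.2])) (PySem.Dict.empty : PySem.Dict Int (List Int))).contains w) = decide (w ∈ (((PySem.List.enumerate l2).map Prod.swap).foldl (fun d q => d.modify q.1 [] (· ++ [q.2])) (PySem.Dict.empty : PySem.Dict Int (List Int))).keys) from PySem.Dict.contains_eq_decide_mem_keys _ _, PySem.Dict.keys_foldl_modify_key]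
    have : ((PySem.List.enumerate l2).map Prod.swap).map (fun q => q.1) = l2 := by
      rw [List.map_map]
      have : (Prod.fst ∘ Prod.swap : Int × Int → Int) = Prod.snd := by
        funext p; cases p; rfl
      rw [this]
      exact PySem.List.map_snd_enumerate l2 0
    rw [this]
    simp [PySem.Dict.keys_empty, PySem.Set.update_nil_left, PySem.Set.mem_ofList]
  have hgetD : (((PySem.List.enumerate l2).map Prod.swap).foldl
      (fun d q => d.modify q.1 [] (· ++ [q.2])) (PySem.Dict.empty : PySem.Dict Int (List Int))).getD v []
      = (pvOccPos l2 v).map (fun k : Nat => (k : Int)) := by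
    rw [PySem.Dict.getD_foldl_modify_append, pv_enum_filter l2 v 0]
    simp [PySem.Dict.getD_empty]
  rw [hfold]
  by_cases hv : v ∈ l2
  · rw [if_pos hv]
    cases hq : (((PySem.List.enumerate l2).map Prod.swap).foldl
        (fun d q => d.modify q.1 [] (· ++ [q.2])) (PySem.Dict.empty : PySem.Dict Int (List Int))).get? v with
    | none =>
      have := hkeys v
      rw [PySem.Dict.contains_eq_isSome_get?, hq] at this
      simp [hv] at this
    | some w =>
      have := hgetD
      rw [PySem.Dict.getD_eq_get?_getD, hq] at this
      simp only [Option.getD_some] at this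
      rw [this]
  · rw [if_neg hv]
    have := hkeys v
    rw [PySem.Dict.contains_eq_isSome_get?] at this
    simp only [hv, decide_false] at this
    exact Option.not_isSome_iff_eq_none.mp (by simp [this])

-- B's pop loop: it never fails under the count precondition, and the removed set
-- collects exactly the indices whose prefix count is below list1's count
theorem pv_pop_loop (l2 : List Int) (positions : PySem.Dict Int (List Int))
    (hpos : ∀ v : Int, positions.get? v = if v ∈ l2 then
        some ((pvOccPos l2 v).map (fun k : Nat => (k : Int))) else none) :
    ∀ (rest p : List Int),
    (∀ v, (p ++ rest).count v ≤ l2.count v) →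
    ∀ (tk : PySem.Dict Int Int) (rem : PySem.Set Int),
    (∀ v : Int, tk.getD v 0 = (p.count v : Int)) →
    (∀ j : Int, j ∈ rem ↔ ∃ pn : Nat, j = (pn : Int) ∧ pn < l2.length ∧
        (l2.take pn).count (l2.getD pn 0) < p.count (l2.getD pn 0)) →
    ∃ s : PySem.Dict Int Int × PySem.Set Int,
      rest.foldl
        (fun (acc : Option (PySem.Dict Int Int × PySem.Set Int)) x =>
          acc.bind (fun s =>
            match positions.get? x with
            | none => none
            | some ps =>
              match PySem.List.pyGet? ps (s.1.getD x 0) with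
              | none => none
              | some j => some (s.1.insert x (s.1.getD x 0 + 1), PySem.Set.add s.2 j)))
        (some (tk, rem)) = some s ∧
      (∀ j : Int, j ∈ s.2 ↔ ∃ pn : Nat, j = (pn : Int) ∧ pn < l2.length ∧
        (l2.take pn).count (l2.getD pn 0) < (p ++ rest).count (l2.getD pn 0)) := by
  intro rest
  induction rest with
  | nil =>
    intro p _ tk rem htk hrem
    exact ⟨(tk, rem), rfl, by simpa using hrem⟩
  | cons x rest' ih =>
    intro p hcnt tk rem htk hrem
    have hxcnt : p.count x + 1 ≤ l2.count x := by
      have h1 := hcnt x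
      rw [List.count_append, List.count_cons_self] at h1
      omega
    have hxmem : x ∈ l2 := List.one_le_count_iff.mp (by omega)
    have hlen : p.count x < (pvOccPos l2 x).length := by
      rw [pvOccPos_length]; omega
    have hP : (pvOccPos l2 x).drop (p.count x)
        = (pvOccPos l2 x)[p.count x] :: (pvOccPos l2 x).drop (p.count x + 1) :=
      List.drop_eq_getElem_cons hlen
    obtain ⟨hj1, hj2, hj3⟩ := pvOccPos_drop l2 x (p.count x) _ _ hP
    have hget : PySem.List.pyGet? ((pvOccPos l2 x).map (fun k : Nat => (k : Int)))
        (tk.getD x 0) = some (((pvOccPos l2 x)[p.count x] : Nat) : Int) := by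
      rw [htk x, PySem.List.pyGet?_natCast, List.getElem?_map,
        List.getElem?_eq_getElem hlen]
      rfl
    -- the fold takes one step
    rw [List.foldl_cons, Option.bind_some, hpos x, if_pos hxmem]
    dsimp only
    rw [hget]
    have hcnt' : ∀ v, ((p ++ [x]) ++ rest').count v ≤ l2.count v := by
      intro v
      have h1 := hcnt v
      simp only [List.count_append, List.count_cons] at h1 ⊢
      simp only [List.count_nil]
      omega
    have htk' : ∀ v : Int, (tk.insert x (tk.getD x 0 + 1)).getD v 0 = ((p ++ [x]).count v : Int) := by
      intro v
      by_cases hv : v = x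
      · subst hv
        rw [PySem.Dict.getD_insert_self, htk v, List.count_append]
        have : List.count v [v] = 1 := by simp
        rw [this]
        push_cast; ring
      · rw [PySem.Dict.getD_insert_of_ne tk _ _ hv, htk v, List.count_append]
        have : List.count v [x] = 0 :=
          List.count_eq_zero.mpr (fun hm => hv (List.mem_singleton.mp hm))
        omega
    have hrem' : ∀ j : Int, j ∈ PySem.Set.add rem (((pvOccPos l2 x)[p.count x] : Nat) : Int) ↔
        ∃ pn : Nat, j = (pn : Int) ∧ pn < l2.length ∧
          (l2.take pn).count (l2.getD pn 0) < (p ++ [x]).count (l2.getD pn 0) := by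
      intro j
      rw [PySem.Set.mem_add]
      constructor
      · rintro (hj | hj)
        · obtain ⟨pn, h1, h2, h3⟩ := (hrem j).mp hj
          refine ⟨pn, h1, h2, ?_⟩
          have : p.count (l2.getD pn 0) ≤ (p ++ [x]).count (l2.getD pn 0) := by
            rw [List.count_append]; omega
          omega
        · refine ⟨(pvOccPos l2 x)[p.count x], hj, hj1, ?_⟩
          rw [hj2, hj3, List.count_append, List.count_cons_self]
          simp
      · rintro ⟨pn, h1, h2, h3⟩
        by_cases hv : l2.getD pn 0 = x
        · rw [hv] at h3
          rw [List.count_append, List.count_cons_self, List.count_nil] at h3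
          by_cases hlt : (l2.take pn).count x < p.count x
          · exact Or.inl ((hrem j).mpr ⟨pn, h1, h2, by rw [hv]; exact hlt⟩)
          · have heq : (l2.take pn).count x = p.count x := by omega
            obtain ⟨tl', htl'⟩ := pvOccPos_of_count l2 x pn h2 hv
            rw [heq, hP] at htl'
            obtain ⟨hpn, _⟩ := List.cons.inj htl'
            right
            rw [h1, hpn]
        · have : (p ++ [x]).count (l2.getD pn 0) = p.count (l2.getD pn 0) := by
            rw [List.count_append]
            have : List.count (l2.getD pn 0) [x] = 0 :=
              List.count_eq_zero.mpr (fun hm => hv (List.mem_singleton.mp hm))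
            omega
          rw [this] at h3
          exact Or.inl ((hrem j).mpr ⟨pn, h1, h2, h3⟩)
    obtain ⟨s, hs1, hs2⟩ := ih (p ++ [x]) hcnt' _ _ htk' hrem'
    refine ⟨s, hs1, ?_⟩
    intro j
    rw [hs2 j, List.append_assoc, List.singleton_append]

-- the survivor scan over the removed set is the decrement scan
theorem pv_scan_eq (l2 l1 : List Int) (rem : PySem.Set Int)
    (hrem : ∀ j : Int, j ∈ rem ↔ ∃ pn : Nat, j = (pn : Int) ∧ pn < l2.length ∧
        (l2.take pn).count (l2.getD pn 0) < l1.count (l2.getD pn 0)) :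
    ∀ (suf : List Int) (k : Nat), l2.drop k = suf →
    ∀ (d : PySem.Dict Int Int),
    (∀ v, d.getD v 0 = (l1.count v : Int) - (min ((l2.take k).count v) (l1.count v) : Nat)) →
    pvFind rem (PySem.List.enumerate suf (k : Int)) = pvScan d suf := by
  intro suf
  induction suf with
  | nil => intro k _ d _; simp [PySem.List.enumerate_nil, pvFind, pvScan]
  | cons y t ih =>
    intro k hk d hd
    have hklen : k < l2.length := by
      by_contra hge
      rw [List.drop_eq_nil_of_le (by omega)] at hk
      exact List.cons_ne_nil y t hk.symm
    have hkget : l2[k]? = some y := by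
      have h0 : (l2.drop k)[0]? = l2[k]? := by simp [List.getElem?_drop]
      rw [← h0, hk]
      rfl
    have hky : l2.getD k 0 = y := by
      rw [List.getD_eq_getElem?_getD, hkget]
      rfl
    have hkt : l2.drop (k + 1) = t := by
      have : l2.drop (k + 1) = (l2.drop k).drop 1 := by rw [List.drop_drop]
      rw [this, hk, List.drop_succ_cons, List.drop_zero]
    have htake : (l2.take (k + 1)).count y = (l2.take k).count y + 1 ∧
        ∀ v, v ≠ y → (l2.take (k + 1)).count v = (l2.take k).count v := by
      have hts : l2.take (k + 1) = l2.take k ++ [y] := by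
        rw [List.take_add_one, hkget]
        rfl
      constructor
      · rw [hts, List.count_append]; simp
      · intro v hv
        rw [hts, List.count_append]
        have : List.count v [y] = 0 :=
          List.count_eq_zero.mpr (fun hm => hv (List.mem_singleton.mp hm))
        omega
    have hmem : ((k : Int) ∈ rem) ↔ (l2.take k).count y < l1.count y := by
      rw [hrem]
      constructor
      · rintro ⟨pn, h1, _, h3⟩
        have : pn = k := by exact_mod_cast h1.symm
        subst this
        rwa [hky] at h3
      · intro h
        exact ⟨k, rfl, hklen, by rwa [hky]⟩
    rw [PySem.List.enumerate_cons]
    simp only [pvFind]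
    by_cases hc : (l2.take k).count y < l1.count y
    · -- index k was removed: skip / decrement
      have hcont : PySem.Set.contains rem (k : Int) = true :=
        (PySem.Set.contains_iff rem _).mpr (hmem.mpr hc)
      rw [if_pos hcont]
      have hdy : d.getD y 0 = (l1.count y : Int) - ((l2.take k).count y : Nat) := by
        rw [hd y]
        congr 1
        simp [Nat.min_eq_left (by omega : (l2.take k).count y ≤ l1.count y)]
      have hpos : d.getD y 0 > 0 := by rw [hdy]; omega
      have hscan : pvScan d (y :: t) = pvScan (d.insert y (d.getD y 0 - 1)) t := by
        simp only [pvScan]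
        rw [if_pos hpos]
      rw [hscan]
      have : ((k : Int) + 1) = ((k + 1 : Nat) : Int) := by push_cast; ring
      rw [this]
      apply ih (k + 1) hkt
      intro v
      by_cases hv : v = y
      · subst hv
        rw [PySem.Dict.getD_insert_self, hdy, htake.1]
        have : min ((l2.take k).count v + 1) (l1.count v) = (l2.take k).count v + 1 := by omega
        rw [this]
        push_cast; ring
      · rw [PySem.Dict.getD_insert_of_ne d _ _ hv, hd v, htake.2 v hv]
    · -- index k survives: both return y
      rw [if_neg (show ¬ (PySem.Set.contains rem (k : Int) = true) from
        fun h => hc (hmem.mp ((PySem.Set.contains_iff rem _).mp h)))]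
      have hdy : d.getD y 0 = 0 := by
        rw [hd y]
        have : min ((l2.take k).count y) (l1.count y) = l1.count y := by omega
        rw [this]
        ring
      simp only [pvScan]
      rw [if_neg (by rw [hdy]; omega)]

-- ===== VERDICT (by name: the statement is the Claim_ definition above) =====
theorem find_missing_spec : Claim_equal_find_missing := by
  intro l1 l2 _ hpre
  unfold Spec_find_missing
  have hc : ∀ v, l1.count v ≤ l2.count v := by
    intro v
    by_cases hv : v ∈ l1
    · exact hpre v hv
    · rw [List.count_eq_zero.mpr hv]; omega
  -- B's side: fold succeeds and the removed set has the prefix-count characterisation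
  have hrem0 : ∀ j : Int, j ∈ (PySem.Set.empty : PySem.Set Int) ↔
      ∃ pn : Nat, j = (pn : Int) ∧ pn < l2.length ∧
        (l2.take pn).count (l2.getD pn 0) < List.count (l2.getD pn 0) ([] : List Int) := by
    intro j
    simp [PySem.Set.empty]
  have hcnt0 : ∀ v, (([] : List Int) ++ l1).count v ≤ l2.count v := by
    intro v; simpa using hc v
  have htk0 : ∀ v : Int, (PySem.Dict.empty : PySem.Dict Int Int).getD v 0
      = (List.count v ([] : List Int) : Int) := by
    intro v
    simp [PySem.Dict.getD_empty]
  obtain ⟨s, hfold, hrem⟩ := pv_pop_loop l2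
    ((PySem.List.enumerate l2).foldl (fun d p => d.modify p.2 [] (· ++ [p.1])) PySem.Dict.empty)
    (pv_build l2) l1 [] hcnt0 _ _ htk0 hrem0
  have halt : find_missing_alt l1 l2 = pvFind s.2 (PySem.List.enumerate l2) := by
    unfold find_missing_alt
    simp only []
    rw [hfold]
  have hrem' : ∀ j : Int, j ∈ s.2 ↔ ∃ pn : Nat, j = (pn : Int) ∧ pn < l2.length ∧
      (l2.take pn).count (l2.getD pn 0) < l1.count (l2.getD pn 0) := by
    intro j
    rw [hrem j]
    simp
  have hscan : find_missing_alt l1 l2 = pvScan (PySem.Dict.counter l1) l2 := by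
    rw [halt]
    have h0 : l2.drop 0 = l2 := List.drop_zero
    have := pv_scan_eq l2 l1 s.2 hrem' l2 0 h0 (PySem.Dict.counter l1) (by
      intro v
      rw [PySem.Dict.getD_counter]
      simp)
    simpa using this
  rw [hscan]
  -- A's side
  unfold find_missing
  by_cases hempty : l1.length = 0 ∧ l2.length = 0
  · obtain ⟨h1, h2⟩ := hempty
    rw [List.length_eq_zero_iff] at h1 h2
    subst h1; subst h2
    simp [pvScan]
  · rw [if_neg hempty]
    exact pv_main l2 l1 (PySem.Dict.counter l1)
      (fun v => by rw [PySem.Dict.getD_counter]) hc
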